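-- pv_equiv track=rewrite | github.com/snipe02/DESENVOLVIMENTO-ORIENTADO-A-TESTES | LISTA_2/04_quest_doot.py | procura_menor
-- ===== SOURCE A (Python) =====
-- def procura_menor(lista):
--     menor = lista[0]
--     pos = 0
--     for i in range(len(lista)):
--         if lista[i] <= menor:
--            menor = lista[i]
--            pos = i
--     return menor,pos
-- ===== SOURCE B (Python) =====
-- def procura_menor(lista):
--     menor = min(lista)
--     pos = len(lista) - 1 - lista[::-1].index(menor)
--     return menor, pos
-- ===== Notes on version B (the rewrite author's own statement) =====
-- stated objective: simpler
-- what changed: Replaces the index-loop tracker (running min + position under <=) by two library passes: menor = min(lista), then the LAST position located from the right via len(lista)-1-lista[::-1].index(menor).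
import Mathlib
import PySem

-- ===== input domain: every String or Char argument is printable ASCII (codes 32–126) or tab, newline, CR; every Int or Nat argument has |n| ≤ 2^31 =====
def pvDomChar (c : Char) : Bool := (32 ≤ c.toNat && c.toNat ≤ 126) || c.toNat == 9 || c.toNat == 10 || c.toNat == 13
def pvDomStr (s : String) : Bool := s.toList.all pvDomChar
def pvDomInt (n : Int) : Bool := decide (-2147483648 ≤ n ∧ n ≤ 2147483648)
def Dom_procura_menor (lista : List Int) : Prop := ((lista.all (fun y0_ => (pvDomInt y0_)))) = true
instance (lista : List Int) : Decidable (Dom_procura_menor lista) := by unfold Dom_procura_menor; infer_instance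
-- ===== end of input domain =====

-- B replaces A's single index-loop tracker by min(lista) plus locating the last position from the right (simpler, same cost).

-- ===== PORT A =====
-- menor = lista[0]; pos = 0; for i in range(len(lista)): if lista[i] <= menor: menor, pos = lista[i], i
-- lista[0] ported as pyGetD lista 0 0: exact on Pre_ (lista ≠ []); in-loop lista[i] is always in range.
def procura_menor (lista : List Int) : Int × Int :=
  let menor : Int := PySem.List.pyGetD lista 0 0
  let pos : Int := 0
  (PySem.List.pyRange 0 (lista.length : Int) 1).foldl
    (fun (st : Int × Int) (i : Int) =>
      if PySem.List.pyGetD lista i 0 ≤ st.1 then (PySem.List.pyGetD lista i 0, i) else st)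
    (menor, pos)

-- ===== PORT B =====
-- menor = min(lista); pos = len(lista) - 1 - lista[::-1].index(menor)
-- min(lista) ported as (min? lista id).getD 0 and .index as (index? …).getD 0: exact on Pre_ (lista ≠ [], so the min exists and occurs).
def procura_menor_alt (lista : List Int) : Int × Int :=
  let menor : Int := (PySem.List.min? lista (fun y => y)).getD 0
  let rev : List Int := (PySem.List.slice? lista none none (-1)).getD []
  let pos : Int := (lista.length : Int) - 1 - ((PySem.List.index? rev menor).getD 0 : Nat)
  (menor, pos)

-- ===== PRECONDITION & SPEC =====
-- Pre_ excludes only the empty list, on which A raises IndexError (and B raises ValueError).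
def Pre_procura_menor (lista : List Int) : Prop := lista ≠ []
instance (lista : List Int) : Decidable (Pre_procura_menor lista) := by unfold Pre_procura_menor; infer_instance
def pvWitness_procura_menor : List Int := [3, 1, 2, 1]

def Spec_procura_menor (lista : List Int) (out : Int × Int) : Prop := out = procura_menor_alt lista
instance (lista : List Int) (out : Int × Int) : Decidable (Spec_procura_menor lista out) := by unfold Spec_procura_menor; infer_instance

-- ===== CLAIM (what is proved, stated in full; the proofs are below) =====
def Claim_equal_procura_menor : Prop := ∀ (lista : List Int), Dom_procura_menor lista → Pre_procura_menor lista → Spec_procura_menor lista (procura_menor lista)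

-- ===== LEMMAS AND PROOFS =====

-- the loop body of A, acting on an (index, value) pair
def pmStep (st : Int × Int) (p : Int × Int) : Int × Int :=
  if p.2 ≤ st.1 then (p.2, p.1) else st

-- A's fold over range(len) with indexing is the fold over enumerate(lista)
theorem procura_menor_eq_enum (lista : List Int) :
    procura_menor lista
      = (PySem.List.enumerate lista 0).foldl pmStep (PySem.List.pyGetD lista 0 0, 0) := by
  unfold procura_menor
  rw [PySem.List.enumerate_eq_map_pyRange (d := 0), List.foldl_map]
  rfl

def pmMin (lista : List Int) : Int := (PySem.List.min? lista (fun y => y)).getD 0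

theorem pmMin_cons (x : Int) (t : List Int) : pmMin (x :: t) = t.foldl min x := by
  simp [pmMin, PySem.List.min?_id_cons]

theorem pmMin_append (l : List Int) (hl : l ≠ []) (x : Int) :
    pmMin (l ++ [x]) = min (pmMin l) x := by
  obtain ⟨h, t, rfl⟩ := List.exists_cons_of_ne_nil hl
  simp [pmMin_cons, List.foldl_append]

theorem pmMin_min?_eq (l : List Int) (hl : l ≠ []) :
    PySem.List.min? l (fun y => y) = some (pmMin l) := by
  obtain ⟨h, t, rfl⟩ := List.exists_cons_of_ne_nil hl
  rw [PySem.List.min?_id_cons, pmMin_cons]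

theorem pmMin_mem (l : List Int) (hl : l ≠ []) : pmMin l ∈ l :=
  PySem.List.min?_mem (pmMin_min?_eq l hl)

-- main invariant: A's enumerate-fold computes (min, last position of the min)
theorem pm_main : ∀ (l : List Int), l ≠ [] →
    (PySem.List.enumerate l 0).foldl pmStep (PySem.List.pyGetD l 0 0, 0)
      = (pmMin l, (l.length : Int) - 1 - ((PySem.List.index? l.reverse (pmMin l)).getD 0 : Nat)) := by
  intro l
  induction l using List.reverseRecOn with
  | nil => intro h; exact absurd rfl h
  | append_singleton l x ih =>
    intro _
    rcases eq_or_ne l [] with rfl | hl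
    · simp [pmStep, pmMin_cons, PySem.List.pyGetD, PySem.List.pyIdx?, PySem.List.pyGet?]
    · have hhead : PySem.List.pyGetD (l ++ [x]) 0 0 = PySem.List.pyGetD l 0 0 := by
        have hlen : 0 < l.length := List.length_pos_iff.mpr hl
        rw [PySem.List.pyGetD_eq_getElem (l ++ [x]) 0 (by omega) (by simp),
            PySem.List.pyGetD_eq_getElem l 0 (by omega) (by simpa using hlen)]
        simp [List.getElem_append_left hlen]
      rw [PySem.List.enumerate_append, List.foldl_append, hhead, ih hl]
      have hmin := pmMin_append l hl x
      have hmem := pmMin_mem l hl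
      simp only [PySem.List.enumerate_cons, PySem.List.enumerate_nil, List.foldl_cons,
        List.foldl_nil, List.reverse_append, List.reverse_cons, List.reverse_nil,
        List.nil_append, List.singleton_append]
      by_cases hx : x ≤ pmMin l
      · have hmx : pmMin (l ++ [x]) = x := by omega
        rw [hmx, pmStep, if_pos (by simpa using hx)]
        rw [PySem.List.index?_cons_self]
        simp
      · have hmx : pmMin (l ++ [x]) = pmMin l := by omega
        have hne : x ≠ pmMin l := by omega
        rw [hmx, pmStep, if_neg (by simpa using hx)]
        rw [PySem.List.index?_cons_of_ne l.reverse hne]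
        have hsome : (PySem.List.index? l.reverse (pmMin l)).isSome := by
          rw [PySem.List.index?_isSome_iff]
          simpa using hmem
        obtain ⟨k, hk⟩ := Option.isSome_iff_exists.mp hsome
        rw [hk]
        simp only [Option.map_some, Option.getD_some, List.length_append,
          List.length_cons, List.length_nil]
        rw [Prod.mk.injEq]
        refine ⟨rfl, by push_cast; omega⟩

-- ===== VERDICT (by name: the statement is the Claim_ definition above) =====
theorem procura_menor_spec : Claim_equal_procura_menor := by
  intro lista _ hpre
  unfold Spec_procura_menor procura_menor_alt
  rw [procura_menor_eq_enum, pm_main lista hpre]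
  simp [pmMin, PySem.List.slice?_none_none_neg_one]
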